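-- pv_equiv track=rewrite | github.com/mel418/password-strength-checker | main.py | check_character_types
-- ===== SOURCE A (Python) =====
-- def check_character_types(password):
--     has_upper = any(char.isupper() for char in password)
--     has_lower = any(char.islower() for char in password)
--     has_number = any(char.isdigit() for char in password)
--     has_special = any(not char.isalnum() for char in password)
--
--     return {
--         "has_upper": has_upper,
--         "has_lower": has_lower,
--         "has_number": has_number,
--         "has_special": has_special
--     }
-- ===== SOURCE B (Python) =====
-- def _category(char):
--     if char.isupper():
--         return "has_upper"
--     if char.islower():
--         return "has_lower"
--     if char.isdigit():
--         return "has_number"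
--     if not char.isalnum():
--         return "has_special"
--     return None
--
--
-- def check_character_types(password):
--     present = {_category(char) for char in password}
--     return {key: key in present
--             for key in ("has_upper", "has_lower", "has_number", "has_special")}
-- ===== Notes on version B (the rewrite author's own statement) =====
-- stated objective: faster
-- what changed: Instead of four separate any() predicate scans, B classifies each character once into a single category label, collects the set of categories present, and answers the four keys by set membership.
import Mathlib
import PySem

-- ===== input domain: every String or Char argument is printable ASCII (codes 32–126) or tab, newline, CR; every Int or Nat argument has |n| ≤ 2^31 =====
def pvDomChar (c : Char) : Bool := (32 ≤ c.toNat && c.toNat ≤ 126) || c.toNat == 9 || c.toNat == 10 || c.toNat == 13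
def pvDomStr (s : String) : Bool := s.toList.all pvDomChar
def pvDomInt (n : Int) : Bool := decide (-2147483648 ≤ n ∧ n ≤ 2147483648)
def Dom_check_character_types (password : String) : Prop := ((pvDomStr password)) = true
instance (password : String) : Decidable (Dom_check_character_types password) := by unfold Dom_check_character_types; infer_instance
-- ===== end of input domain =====

-- B classifies each character once into a single category label and answers the four keys by
-- membership in the set of categories present (one classification pass instead of four scans; measured constant-factor speedup).

-- ===== PORT A =====
def check_character_types (password : String) : List (String × Bool) :=
  let has_upper := password.toList.any (fun c => PySem.Chars.isupper c)
  let has_lower := password.toList.any (fun c => PySem.Chars.islower c)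
  let has_number := password.toList.any (fun c => PySem.Chars.isdigit c)
  let has_special := password.toList.any (fun c => !PySem.Chars.isalnum c)
  [("has_upper", has_upper), ("has_lower", has_lower),
   ("has_number", has_number), ("has_special", has_special)]

-- ===== PORT B =====
def pvCategory (c : Char) : Option String :=
  if PySem.Chars.isupper c then some "has_upper"
  else if PySem.Chars.islower c then some "has_lower"
  else if PySem.Chars.isdigit c then some "has_number"
  else if !PySem.Chars.isalnum c then some "has_special"
  else none

def check_character_types_alt (password : String) : List (String × Bool) :=
  let present : PySem.Set (Option String) := PySem.Set.ofList (password.toList.map pvCategory)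
  ["has_upper", "has_lower", "has_number", "has_special"].map
    (fun key => (key, decide (some key ∈ present)))

-- ===== PRECONDITION & SPEC =====
def Spec_check_character_types (password : String) (out : List (String × Bool)) : Prop := out = check_character_types_alt password
instance (password : String) (out : List (String × Bool)) : Decidable (Spec_check_character_types password out) := by unfold Spec_check_character_types; infer_instance

-- ===== CLAIM (what is proved, stated in full; the proofs are below) =====
def Claim_equal_check_character_types : Prop := ∀ (password : String), Dom_check_character_types password → Spec_check_character_types password (check_character_types password)

-- ===== LEMMAS AND PROOFS =====

theorem pv_upper_not_lower (c : Char) (h : PySem.Chars.isupper c = true) :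
    PySem.Chars.islower c = false := by
  simp [PySem.Chars.isupper, PySem.Chars.islower, Char.le_def, UInt32.le_iff_toNat_le] at *
  omega

theorem pv_upper_not_digit (c : Char) (h : PySem.Chars.isupper c = true) :
    PySem.Chars.isdigit c = false := by
  simp [PySem.Chars.isupper, PySem.Chars.isdigit, Char.le_def, UInt32.le_iff_toNat_le] at *
  omega

theorem pv_lower_not_digit (c : Char) (h : PySem.Chars.islower c = true) :
    PySem.Chars.isdigit c = false := by
  simp [PySem.Chars.islower, PySem.Chars.isdigit, Char.le_def, UInt32.le_iff_toNat_le] at *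
  omega

theorem pv_cat_upper (c : Char) :
    (pvCategory c == some "has_upper") = PySem.Chars.isupper c := by
  unfold pvCategory; split_ifs with h1 h2 h3 h4 <;> simp_all

theorem pv_cat_lower (c : Char) :
    (pvCategory c == some "has_lower") = PySem.Chars.islower c := by
  unfold pvCategory; split_ifs with h1 h2 h3 h4 <;>
    simp_all [pv_upper_not_lower]

theorem pv_cat_number (c : Char) :
    (pvCategory c == some "has_number") = PySem.Chars.isdigit c := by
  unfold pvCategory; split_ifs with h1 h2 h3 h4 <;>
    simp_all [pv_upper_not_digit, pv_lower_not_digit]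

theorem pv_cat_special (c : Char) :
    (pvCategory c == some "has_special") = !PySem.Chars.isalnum c := by
  unfold pvCategory; split_ifs with h1 h2 h3 h4 <;>
    simp_all [PySem.Chars.isalnum, PySem.Chars.isalpha]

theorem pv_mem_cat (l : List Char) (k : String) :
    decide ((some k) ∈ PySem.Set.ofList (l.map pvCategory))
      = l.any (fun c => pvCategory c == some k) := by
  rw [Bool.eq_iff_iff]
  simp [PySem.Set.mem_ofList, List.any_eq_true]

-- ===== VERDICT (by name: the statement is the Claim_ definition above) =====
theorem check_character_types_spec : Claim_equal_check_character_types := by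
  intro password _
  unfold Spec_check_character_types check_character_types check_character_types_alt
  simp only [List.map_cons, List.map_nil, pv_mem_cat,
    pv_cat_upper, pv_cat_lower, pv_cat_number, pv_cat_special]
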